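-- pv_equiv track=rewrite | github.com/vpc20/python-algorithms | RecursionExercises.py | appears_in
-- ===== SOURCE A (Python) =====
-- def head(lst):
--     return lst[0]
--
-- def tail(lst):
--     return lst[1:]
--
-- def appears_in(s, ch):
--     if s:
--         if head(s) == ch:
--             return True
--         else:
--             return appears_in(tail(s), ch)
--     else:
--         return False
-- ===== SOURCE B (Python) =====
-- def appears_in(s, ch):
--     for x in s:
--         if x == ch:
--             return True
--     return False
-- ===== Notes on version B (the rewrite author's own statement) =====
-- stated objective: faster
-- what changed: Replaced the head/tail recursion (which copies the tail via s[1:] on every step, making A quadratic) by a single iterative forward loop with an early return and no helper functions.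
import Mathlib
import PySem

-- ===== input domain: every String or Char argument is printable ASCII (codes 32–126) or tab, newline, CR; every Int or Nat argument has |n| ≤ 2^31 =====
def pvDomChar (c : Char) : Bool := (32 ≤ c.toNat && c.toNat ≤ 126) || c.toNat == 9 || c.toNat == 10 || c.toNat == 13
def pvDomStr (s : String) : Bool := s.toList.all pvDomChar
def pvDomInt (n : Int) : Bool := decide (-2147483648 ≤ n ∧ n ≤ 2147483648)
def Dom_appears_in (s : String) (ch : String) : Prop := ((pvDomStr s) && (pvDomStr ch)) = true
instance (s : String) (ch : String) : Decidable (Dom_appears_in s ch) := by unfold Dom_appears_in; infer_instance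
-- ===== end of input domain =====

-- B replaces A's head/tail recursion by a single iterative scan (early-return loop); return value only.

-- ===== PORT A =====
-- A recurses on the string: head(s) is s[0] (a one-char string compared to ch), tail(s) is s[1:].
def appearsInRec (l : List Char) (ch : String) : Bool :=
  match l with
  | [] => false                                   -- 'else: return False'
  | c :: rest =>
      if String.mk [c] == ch then true            -- 'if head(s) == ch: return True'
      else appearsInRec rest ch                   -- 'return appears_in(tail(s), ch)'

def appears_in (s : String) (ch : String) : Bool := appearsInRec s.toList ch

-- ===== PORT B =====
-- 'for x in s: if x == ch: return True' / 'return False'  — an early-exit scan, i.e. List.any.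
def appears_in_alt (s : String) (ch : String) : Bool :=
  s.toList.any (fun c => String.mk [c] == ch)

-- ===== PRECONDITION & SPEC =====
def Spec_appears_in (s : String) (ch : String) (out : Bool) : Prop := out = appears_in_alt s ch
instance (s : String) (ch : String) (out : Bool) : Decidable (Spec_appears_in s ch out) := by unfold Spec_appears_in; infer_instance

-- ===== CLAIM (what is proved, stated in full; the proofs are below) =====
def Claim_equal_appears_in : Prop := ∀ (s : String) (ch : String), Dom_appears_in s ch → Spec_appears_in s ch (appears_in s ch)

-- ===== LEMMAS AND PROOFS =====
theorem appearsInRec_eq_any (l : List Char) (ch : String) :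
    appearsInRec l ch = l.any (fun c => String.mk [c] == ch) := by
  induction l with
  | nil => rfl
  | cons c rest ih =>
      simp only [appearsInRec, List.any_cons]
      by_cases h : String.mk [c] == ch
      · simp [h]
      · simp [h, ih]

-- ===== VERDICT (by name: the statement is the Claim_ definition above) =====
theorem appears_in_spec : Claim_equal_appears_in := by
  intro s ch _
  unfold Spec_appears_in appears_in appears_in_alt
  exact appearsInRec_eq_any s.toList ch
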